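-- pv_equiv track=rewrite | github.com/dcamposbiorender/AICoS-lab | src/personalization/brief_personalizer.py | _prioritize_highlights
-- ===== SOURCE A (Python) =====
-- from typing import Any, Dict, List, Optional, Set, Tuple
--
-- def _prioritize_highlights(highlights: List[str]) -> List[str]:
--     """Sort highlights by importance/relevance"""
--     if not highlights:
--         return []
--
--     # Simple prioritization - could be enhanced with scoring
--     priority_keywords = {
--         'organized': 3,
--         'mentioned': 3,
--         'commitment': 3,
--         'heavy': 2,
--         'created': 2,
--         'attended': 1,
--         'modified': 1,
--         'active': 1
--     }
--
--     def highlight_score(highlight: str) -> int: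
--         score = 0
--         highlight_lower = highlight.lower()
--         for keyword, points in priority_keywords.items():
--             if keyword in highlight_lower:
--                 score += points
--         return score
--
--     # Sort by score, then alphabetically for consistency
--     return sorted(highlights, key=lambda h: (-highlight_score(h), h))
-- ===== SOURCE B (Python) =====
-- from typing import List
--
--
-- def _prioritize_highlights(highlights: List[str]) -> List[str]:
--     """Group highlights into score buckets, then emit buckets in descending
--     score order, each bucket sorted alphabetically."""
--     if not highlights:
--         return []
--
--     priority_keywords = {
--         'organized': 3,
--         'mentioned': 3,
--         'commitment': 3,
--         'heavy': 2,
--         'created': 2,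
--         'attended': 1,
--         'modified': 1,
--         'active': 1
--     }
--
--     def highlight_score(highlight: str) -> int:
--         hl = highlight.lower()
--         return sum(points for kw, points in priority_keywords.items() if kw in hl)
--
--     buckets = {}
--     for h in highlights:
--         buckets.setdefault(highlight_score(h), []).append(h)
--
--     result = []
--     for s in sorted(buckets, reverse=True):
--         result.extend(sorted(buckets[s]))
--     return result
-- ===== Notes on version B (the rewrite author's own statement) =====
-- stated objective: alternative
-- what changed: Replaces the single composite-key (-score, string) sort by a score->bucket dict built in one pass, then emits distinct scores in descending order with each bucket sorted alphabetically.
import Mathlib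
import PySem

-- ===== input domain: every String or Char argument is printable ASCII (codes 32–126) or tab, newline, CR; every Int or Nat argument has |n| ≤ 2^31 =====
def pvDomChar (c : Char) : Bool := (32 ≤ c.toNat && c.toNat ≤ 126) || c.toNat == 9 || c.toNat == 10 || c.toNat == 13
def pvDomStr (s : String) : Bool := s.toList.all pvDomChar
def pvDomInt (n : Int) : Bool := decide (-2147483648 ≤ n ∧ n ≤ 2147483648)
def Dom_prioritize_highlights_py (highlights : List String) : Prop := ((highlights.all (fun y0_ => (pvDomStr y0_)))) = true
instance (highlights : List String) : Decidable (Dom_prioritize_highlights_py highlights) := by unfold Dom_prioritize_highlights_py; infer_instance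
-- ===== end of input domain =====

-- B groups highlights into score buckets and concatenates per-score alphabetical sorts, instead of one composite-key sort; same cost, different decomposition.

-- ===== PORT A =====
def pvKeywords : PySem.Dict String Int :=
  PySem.Dict.ofList [("organized", 3), ("mentioned", 3), ("commitment", 3), ("heavy", 2),
    ("created", 2), ("attended", 1), ("modified", 1), ("active", 1)]

def pvScoreA (highlight : String) : Int :=
  let highlight_lower := PySem.Str.lower highlight
  pvKeywords.items.foldl
    (fun score p => if PySem.Str.isIn p.1 highlight_lower then score + p.2 else score) 0

def prioritize_highlights_py (highlights : List String) : List String :=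
  if highlights = [] then []
  else PySem.List.sorted2 highlights (fun h => -(pvScoreA h)) (fun h => h)

-- ===== PORT B =====
def pvScoreB (highlight : String) : Int :=
  let hl := PySem.Str.lower highlight
  ((pvKeywords.items.filter (fun p => PySem.Str.isIn p.1 hl)).map (fun p => p.2)).sum

def prioritize_highlights_py_alt (highlights : List String) : List String :=
  if highlights = [] then []
  else
    let buckets := highlights.foldl
      (fun d h => d.modify (pvScoreB h) [] (fun l => l ++ [h])) PySem.Dict.empty
    -- buckets[s] ported as getD s []: exact, every s iterated is a key of buckets
    (PySem.List.sorted buckets.keys (fun s => s) true).foldl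
      (fun result s => result ++ PySem.List.sorted (buckets.getD s []) (fun x => x)) []

-- ===== PRECONDITION & SPEC =====
def Spec_prioritize_highlights_py (highlights : List String) (out : List String) : Prop := out = prioritize_highlights_py_alt highlights
instance (highlights : List String) (out : List String) : Decidable (Spec_prioritize_highlights_py highlights out) := by unfold Spec_prioritize_highlights_py; infer_instance

-- ===== CLAIM (what is proved, stated in full; the proofs are below) =====
def Claim_equal_prioritize_highlights_py : Prop := ∀ (highlights : List String), Dom_prioritize_highlights_py highlights → Spec_prioritize_highlights_py highlights (prioritize_highlights_py highlights)

-- ===== LEMMAS AND PROOFS =====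

theorem pv_foldl_if_add {α : Type} (P : α → Bool) (f : α → Int) :
    ∀ (l : List α) (s : Int), l.foldl (fun acc p => if P p then acc + f p else acc) s = s + ((l.filter P).map f).sum := by
  intro l
  induction l with
  | nil => simp
  | cons x t ih =>
    intro s
    by_cases h : P x = true <;> simp [h, ih, List.filter_cons] <;> ring


theorem pv_sorted2_lex (xs : List String) (k1 : String → Int) (k2 : String → String) :
    PySem.List.sorted2 xs k1 k2 = PySem.List.sorted xs (fun x => toLex (k1 x, k2 x)) := by
  show List.foldl _ [] xs = List.foldl _ [] xs
  have h : (fun (a b : String) => decide (k1 a < k1 b) || (!decide (k1 b < k1 a) && decide (k2 a < k2 b)))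
      = (fun a b => decide (toLex (k1 a, k2 a) < toLex (k1 b, k2 b))) := by
    funext a b
    simp only [Prod.Lex.toLex_lt_toLex]
    rcases lt_trichotomy (k1 a) (k1 b) with h1 | h1 | h1
    · simp [h1, not_lt_of_gt h1, h1.ne]
    · simp [h1]
    · simp [not_lt_of_gt h1, h1.ne', h1]
  simp only [PySem.List.sorted2, PySem.List.sorted]
  rw [h]
  rfl


theorem pv_perm_flatMap_filter (scores : List Int) (sc : String → Int) :
    ∀ (xs : List String), scores.Nodup → (∀ h ∈ xs, sc h ∈ scores) →
    (scores.flatMap (fun s => xs.filter (fun h => sc h == s))).Perm xs := by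
  induction scores with
  | nil =>
    intro xs _ hall
    cases xs with
    | nil => simp
    | cons x t => exact absurd (hall x (by simp)) (by simp)
  | cons s rest ih =>
    intro xs hnd hall
    have hrest : ∀ s' ∈ rest, xs.filter (fun h => sc h == s')
        = (xs.filter (fun h => !(sc h == s))).filter (fun h => sc h == s') := by
      intro s' hs'
      rw [List.filter_filter]
      apply List.filter_congr
      intro x _
      have : s' ≠ s := by rintro rfl; exact (List.nodup_cons.mp hnd).1 hs'
      by_cases hx : sc x = s'
      · simp [hx, this]
      · simp [hx]
    have hflat : rest.flatMap (fun s' => xs.filter (fun h => sc h == s'))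
        = rest.flatMap (fun s' => (xs.filter (fun h => !(sc h == s))).filter (fun h => sc h == s')) := by
      apply List.flatMap_congr
      intro s' hs'
      exact hrest s' hs'
    have ihh := ih (xs.filter (fun h => !(sc h == s))) (List.nodup_cons.mp hnd).2 (by
      intro h hh
      have := List.of_mem_filter hh
      have hmem := hall h (List.mem_of_mem_filter hh)
      simp at this
      simpa [this] using hmem)
    rw [List.flatMap_cons, hflat]
    exact ((ihh.append_left (xs.filter (fun h => sc h == s))).trans
      (by simpa using List.filter_append_perm (fun h => sc h == s) xs))


theorem pvScore_eq (h : String) : pvScoreB h = pvScoreA h := by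
  simp [pvScoreA, pvScoreB, pv_foldl_if_add]


theorem pv_main (xs : List String) : prioritize_highlights_py xs = prioritize_highlights_py_alt xs := by
  by_cases hxs : xs = []
  · simp [prioritize_highlights_py, prioritize_highlights_py_alt, hxs]
  · unfold prioritize_highlights_py prioritize_highlights_py_alt
    simp only [if_neg hxs]
    have hsc : pvScoreB = pvScoreA := funext pvScore_eq
    rw [pv_sorted2_lex, hsc]
    set keyL : String → Lex (Int × String) := fun x => toLex (-(pvScoreA x), x) with hkey
    set buckets := xs.foldl (fun d h => d.modify (pvScoreA h) [] (fun l => l ++ [h]))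
      PySem.Dict.empty with hbdef
    have hpairs : buckets = (xs.map (fun h => (pvScoreA h, h))).foldl
        (fun d p => d.modify p.1 [] (fun l => l ++ [p.2])) PySem.Dict.empty := by
      rw [hbdef, List.foldl_map]
    have hbgetD : ∀ s, buckets.getD s [] = xs.filter (fun h => pvScoreA h == s) := by
      intro s
      rw [hpairs, PySem.Dict.getD_foldl_modify_append]
      simp [List.filter_map, Function.comp_def]
    have hbkeys : buckets.keys = PySem.Set.ofList (xs.map pvScoreA) := by
      rw [hbdef, PySem.Dict.keys_foldl_modify_key xs pvScoreA [] (fun _ h => fun l => l ++ [h])]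
      rfl
    have hknd : buckets.keys.Nodup := by
      rw [hbkeys]; exact PySem.Set.nodup_ofList _
    set SK := PySem.List.sorted buckets.keys (fun s => s) true with hSK
    have hSKnd : SK.Nodup := by
      rw [hSK]; exact (PySem.List.sorted_perm buckets.keys (fun s => s) true).symm.nodup hknd
    have hSKmem : ∀ h ∈ xs, pvScoreA h ∈ SK := by
      intro h hh
      rw [hSK, PySem.List.mem_sorted, hbkeys, PySem.Set.mem_ofList]
      exact List.mem_map_of_mem hh
    rw [PySem.List.foldl_append_eq_flatMap, List.nil_append]
    -- B's result as a flat map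
    set B := SK.flatMap (fun s => PySem.List.sorted (buckets.getD s []) (fun x => x)) with hB
    have hBperm : B.Perm xs := by
      have h1 : B.Perm (SK.flatMap (fun s => xs.filter (fun h => pvScoreA h == s))) := by
        apply List.Perm.flatMap (List.Perm.refl SK)
        intro s _
        rw [hbgetD]
        exact PySem.List.sorted_perm _ _ _
      exact h1.trans (pv_perm_flatMap_filter SK pvScoreA xs hSKnd hSKmem)
    have hAperm : (PySem.List.sorted xs keyL).Perm xs := PySem.List.sorted_perm _ _ _
    have hApw : (PySem.List.sorted xs keyL).Pairwise (fun a b => keyL a ≤ keyL b) :=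
      PySem.List.sorted_pairwise xs keyL
    have hscore : ∀ s, ∀ m ∈ PySem.List.sorted (buckets.getD s []) (fun x => x), pvScoreA m = s := by
      intro s m hm
      rw [PySem.List.mem_sorted, hbgetD] at hm
      simpa using (List.of_mem_filter hm)
    have hBpw : B.Pairwise (fun a b => keyL a ≤ keyL b) := by
      rw [hB, List.pairwise_flatMap]
      constructor
      · intro s _
        have := PySem.List.sorted_pairwise (buckets.getD s []) (fun x => x)
        refine this.imp_of_mem ?_
        intro a b ha hb hab
        rw [hkey]
        rw [Prod.Lex.toLex_le_toLex]
        right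
        exact ⟨by rw [hscore s a ha, hscore s b hb], hab⟩
      · have hp1 : SK.Pairwise (fun s1 s2 => s2 ≤ s1) := by
          simpa using PySem.List.sorted_pairwise_rev buckets.keys (fun s => s)
        have hp2 : SK.Pairwise (fun s1 s2 => s1 ≠ s2) := hSKnd
        refine (hp1.and hp2).imp_of_mem ?_
        rintro s1 s2 _ _ ⟨hle, hne⟩ x hx y hy
        rw [hkey, Prod.Lex.toLex_le_toLex]
        left
        rw [hscore s1 x hx, hscore s2 y hy]
        omega
    exact List.Perm.eq_of_pairwise
      (fun a b _ _ h1 h2 => by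
        have : keyL a = keyL b := le_antisymm h1 h2
        have := congrArg ofLex this
        exact congrArg Prod.snd this)
      hApw hBpw (hAperm.trans hBperm.symm)

-- ===== VERDICT (by name: the statement is the Claim_ definition above) =====
theorem prioritize_highlights_py_spec : Claim_equal_prioritize_highlights_py := by
  intro highlights _
  unfold Spec_prioritize_highlights_py
  exact pv_main highlights
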